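-- pv_equiv track=rewrite | github.com/ourhouchmohamed97/CTF-Playground | solve_segments.py | arithmetic_check
-- ===== SOURCE A (Python) =====
-- TARGET_ARITHMETIC = 0x6a09  # Bytes 19-24 (6 bytes)
--
-- def arithmetic_check(data):
--     """Arithmetic validation for 6 bytes"""
--     prod = 1
--     sum_val = 0
--     xor_val = 0
--
--     for byte_val in data:
--         prod = (prod * byte_val) & 0xFFFF  # Modulo 65537
--         sum_val += byte_val
--         xor_val ^= byte_val
--
--     final = ((sum_val + prod) ^ xor_val + 0x5555) & 0xFFFF
--     return final == TARGET_ARITHMETIC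
-- ===== SOURCE B (Python) =====
-- TARGET_ARITHMETIC = 0x6a09  # Bytes 19-24 (6 bytes)
--
-- def _agg(data):
--     """Divide-and-conquer aggregation: returns (prod mod 2**16, sum, xor) of data.
--     Correct because each component is an associative-commutative monoid
--     (Z/65536 under *, Z under +, Z under ^)."""
--     n = len(data)
--     if n == 0:
--         return (1, 0, 0)
--     if n == 1:
--         b = data[0]
--         return (b % 0x10000, b, b)
--     mid = n // 2
--     p1, s1, x1 = _agg(data[:mid])
--     p2, s2, x2 = _agg(data[mid:])
--     return (p1 * p2 % 0x10000, s1 + s2, x1 ^ x2)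
--
-- def arithmetic_check(data):
--     """Arithmetic validation for 6 bytes"""
--     prod, sum_val, xor_val = _agg(data)
--     return ((sum_val + prod) ^ xor_val + 0x5555) & 0xFFFF == TARGET_ARITHMETIC
-- ===== Notes on version B (the rewrite author's own statement) =====
-- stated objective: alternative
-- what changed: B replaces A's left-to-right fused accumulator loop with a recursive divide-and-conquer: it splits the list in half, aggregates each half into (product mod 2^16, sum, xor) and merges the halves with the monoid operations, relying on associativity/commutativity; A's sequential masking equals the product mod 65536.
import Mathlib
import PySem

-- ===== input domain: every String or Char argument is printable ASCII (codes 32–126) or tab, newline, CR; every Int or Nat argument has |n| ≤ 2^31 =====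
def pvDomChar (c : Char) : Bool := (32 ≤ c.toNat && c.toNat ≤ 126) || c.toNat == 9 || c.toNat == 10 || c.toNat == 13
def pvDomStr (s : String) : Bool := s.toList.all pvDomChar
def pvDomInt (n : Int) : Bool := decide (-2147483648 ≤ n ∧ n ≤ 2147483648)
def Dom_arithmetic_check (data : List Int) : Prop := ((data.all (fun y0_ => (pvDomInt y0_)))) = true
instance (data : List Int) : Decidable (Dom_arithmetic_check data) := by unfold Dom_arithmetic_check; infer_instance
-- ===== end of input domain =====

-- B replaces A's left-to-right fused accumulator loop with a recursive divide-and-conquer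
-- aggregation of (product mod 2^16, sum, xor), merging halves with the monoid operations.

-- ===== PORT A =====
-- one fused loop updating the triple (prod, sum_val, xor_val)
def arithmetic_check (data : List Int) : Bool :=
  let st := data.foldl
    (fun (st : Int × Int × Int) byte_val =>
      (PySem.Int.band (st.1 * byte_val) 65535, st.2.1 + byte_val, PySem.Int.bxor st.2.2 byte_val))
    (1, 0, 0)
  let final := PySem.Int.band (PySem.Int.bxor (st.2.1 + st.1) (st.2.2 + 0x5555)) 65535
  final == 0x6a09

-- ===== PORT B =====
-- _agg: divide-and-conquer aggregation returning (prod mod 2^16, sum, xor) of data;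
-- data[:mid] / data[mid:] with 0 ≤ mid ≤ len are exactly take/drop (PySem.List.slice_to_natCast / slice_from_natCast)
def pvAgg (data : List Int) : Int × Int × Int :=
  let n := data.length
  if n = 0 then (1, 0, 0)
  else if n = 1 then
    -- data[0]: in range since n = 1
    let b := (PySem.List.pyGet? data 0).getD 0
    (PySem.Int.mod b 65536, b, b)
  else
    let mid := n / 2
    let r1 := pvAgg (data.take mid)
    let r2 := pvAgg (data.drop mid)
    (PySem.Int.mod (r1.1 * r2.1) 65536, r1.2.1 + r2.2.1, PySem.Int.bxor r1.2.2 r2.2.2)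
termination_by data.length
decreasing_by
  · simp only [List.length_take]; omega
  · simp only [List.length_drop]; omega

def arithmetic_check_alt (data : List Int) : Bool :=
  let r := pvAgg data
  PySem.Int.band (PySem.Int.bxor (r.2.1 + r.1) (r.2.2 + 0x5555)) 65535 == 0x6a09

-- ===== PRECONDITION & SPEC =====
def Spec_arithmetic_check (data : List Int) (out : Bool) : Prop := out = arithmetic_check_alt data
instance (data : List Int) (out : Bool) : Decidable (Spec_arithmetic_check data out) := by unfold Spec_arithmetic_check; infer_instance

-- ===== CLAIM (what is proved, stated in full; the proofs are below) =====
def Claim_equal_arithmetic_check : Prop := ∀ (data : List Int), Dom_arithmetic_check data → Spec_arithmetic_check data (arithmetic_check data)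

-- ===== LEMMAS AND PROOFS =====

-- Python's `a & 0xFFFF` equals Python's `a % 0x10000` for every int a.
theorem pv_band_mask (a : Int) : PySem.Int.band a 65535 = PySem.Int.mod a 65536 := by
  unfold PySem.Int.band PySem.Int.mod
  have e : Int.toNat 65535 = 65535 := rfl
  have hf : a.fmod 65536 = a % 65536 := by
    rw [Int.fmod_eq_emod]; norm_num
  rcases le_or_gt 0 a with h | h
  · rw [if_pos h, if_pos (by norm_num), e, hf]
    have h1 := Nat.and_two_pow_sub_one_eq_mod a.toNat 16
    simp only [show ((2:Nat)^16) = 65536 from rfl] at h1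
    rw [h1]
    omega
  · rw [if_neg (by omega), if_pos (by norm_num), e, hf]
    have h1 := Nat.and_two_pow_sub_one_eq_mod (-a - 1).toNat 16
    simp only [show ((2:Nat)^16) = 65536 from rfl] at h1
    rw [Nat.land_comm] at h1
    rw [h1]
    have h3 := Int.emod_nonneg a (show (65536:Int) ≠ 0 by norm_num)
    have h4 := Int.emod_lt_of_pos a (show (0:Int) < 65536 by norm_num)
    have h5 : a % 65536 = a - 65536 * (a / 65536) := Int.emod_def a 65536
    have h6 := Nat.mod_lt (-a - 1).toNat (show 0 < 65536 by norm_num)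
    have h8 : ((-a-1).toNat % 65536 : Nat) = (-a-1).toNat - 65536 * ((-a-1).toNat / 65536) := by omega
    omega

-- PySem.Int.mod with a positive modulus is Int.emod.
theorem pv_mod_emod (a : Int) : PySem.Int.mod a 65536 = a % 65536 := by
  unfold PySem.Int.mod
  rw [Int.fmod_eq_emod]
  norm_num

-- sign/magnitude encoding of an Int, under which bxor is componentwise (Bool.xor, Nat.xor)
def pvEnc (a : Int) : Bool × Nat := (decide (a < 0), if 0 ≤ a then a.toNat else (-a - 1).toNat)
def pvDec (p : Bool × Nat) : Int := if p.1 then -(p.2 : Int) - 1 else (p.2 : Int)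

theorem pv_enc_dec (p : Bool × Nat) : pvEnc (pvDec p) = p := by
  obtain ⟨b, n⟩ := p
  cases b <;> simp [pvDec, pvEnc] <;> omega

theorem pv_bxor_dec (a b_ : Int) :
    PySem.Int.bxor a b_ = pvDec ((pvEnc a).1.xor (pvEnc b_).1, (pvEnc a).2 ^^^ (pvEnc b_).2) := by
  unfold PySem.Int.bxor pvEnc pvDec
  rcases le_or_gt 0 a with ha | ha <;> rcases le_or_gt 0 b_ with hb | hb
  · rw [if_pos ha, if_pos hb, if_pos ha, if_pos hb,
        decide_eq_false (not_lt.mpr ha), decide_eq_false (not_lt.mpr hb)]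
    rfl
  · rw [if_pos ha, if_neg (not_le.mpr hb), if_pos ha, if_neg (not_le.mpr hb),
        decide_eq_false (not_lt.mpr ha), decide_eq_true hb]
    rfl
  · rw [if_neg (not_le.mpr ha), if_pos hb, if_neg (not_le.mpr ha), if_pos hb,
        decide_eq_true ha, decide_eq_false (not_lt.mpr hb)]
    rfl
  · rw [if_neg (not_le.mpr ha), if_neg (not_le.mpr hb), if_neg (not_le.mpr ha),
        if_neg (not_le.mpr hb), decide_eq_true ha, decide_eq_true hb]
    rfl

theorem pv_bxor_assoc (a b c : Int) :
    PySem.Int.bxor (PySem.Int.bxor a b) c = PySem.Int.bxor a (PySem.Int.bxor b c) := by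
  rw [pv_bxor_dec a b, pv_bxor_dec b c, pv_bxor_dec (pvDec _) c, pv_bxor_dec a (pvDec _),
      pv_enc_dec, pv_enc_dec]
  simp [Nat.xor_assoc]

theorem pv_bxor_zero_left (a : Int) : PySem.Int.bxor 0 a = a := by
  rw [PySem.Int.bxor_comm]; exact PySem.Int.bxor_zero a

-- an associative fold with a two-sided identity factors out its initial value
theorem pv_foldl_init (op : Int → Int → Int)
    (ha : ∀ a b c, op (op a b) c = op a (op b c))
    (hl : ∀ a, op 0 a = a) (hr : ∀ a, op a 0 = a)
    (l : List Int) (s : Int) : l.foldl op s = op s (l.foldl op 0) := by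
  induction l generalizing s with
  | nil => simp [List.foldl, hr]
  | cons b tl ih =>
    simp only [List.foldl]
    rw [ih (op s b), ih (op 0 b), hl, ← ha]

-- the masked-product fold is the full product reduced mod 2^16 (nonempty list)
theorem pv_prod_fold (l : List Int) (p : Int) (h : l ≠ []) :
    l.foldl (fun q b => PySem.Int.mod (q * b) 65536) p = (p * l.prod) % 65536 := by
  induction l generalizing p with
  | nil => exact absurd rfl h
  | cons b tl ih =>
    simp only [List.foldl, List.prod_cons]
    rcases eq_or_ne tl [] with rfl | hne
    · simp
    · rw [ih _ hne, pv_mod_emod, Int.mul_emod, Int.emod_emod_of_dvd _ (by norm_num),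
        ← Int.mul_emod, mul_assoc]

-- A's fused fold splits into the three independent folds
theorem pv_fused_split (l : List Int) (p s x : Int) :
    l.foldl (fun (st : Int × Int × Int) b =>
        (PySem.Int.band (st.1 * b) 65535, st.2.1 + b, PySem.Int.bxor st.2.2 b)) (p, s, x)
    = (l.foldl (fun q b => PySem.Int.band (q * b) 65535) p,
       l.foldl (· + ·) s,
       l.foldl PySem.Int.bxor x) := by
  induction l generalizing p s x with
  | nil => rfl
  | cons b tl ih => simp only [List.foldl]; exact ih _ _ _

-- the canonical triple both programs compute
def pvTriple (l : List Int) : Int × Int × Int :=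
  (if l = [] then 1 else l.prod % 65536, l.sum, l.foldl PySem.Int.bxor 0)

theorem pv_xor_fold_append (t d : List Int) :
    (t ++ d).foldl PySem.Int.bxor 0
      = PySem.Int.bxor (t.foldl PySem.Int.bxor 0) (d.foldl PySem.Int.bxor 0) := by
  rw [List.foldl_append,
      pv_foldl_init PySem.Int.bxor pv_bxor_assoc pv_bxor_zero_left PySem.Int.bxor_zero]

-- B's divide-and-conquer aggregation computes the canonical triple (strong induction on length).
theorem pv_agg_aux (n : Nat) : ∀ l : List Int, l.length ≤ n → pvAgg l = pvTriple l := by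
  induction n with
  | zero =>
    intro l hl
    have : l = [] := by cases l <;> simp_all
    subst this
    rw [pvAgg]; simp [pvTriple]
  | succ n ih =>
    intro l hl
    rw [pvAgg]
    by_cases h0 : l.length = 0
    · have : l = [] := List.length_eq_zero_iff.mp h0
      subst this; simp [pvTriple]
    by_cases h1 : l.length = 1
    · obtain ⟨a, rfl⟩ := List.length_eq_one_iff.mp h1
      simp [pvTriple, PySem.List.pyGet?, PySem.List.pyIdx?,
        pv_bxor_zero_left, List.foldl]
    · have hn : 2 ≤ l.length := by omega
      simp only [if_neg h0, if_neg h1]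
      have hmid1 : 1 ≤ l.length / 2 := by omega
      have hmidn : l.length / 2 < l.length := by omega
      rw [ih (l.take (l.length / 2)) (by simp [List.length_take]; omega),
          ih (l.drop (l.length / 2)) (by simp [List.length_drop]; omega)]
      have hsplit : l = l.take (l.length / 2) ++ l.drop (l.length / 2) :=
        (List.take_append_drop _ l).symm
      have htne : l.take (l.length / 2) ≠ [] := by
        intro h; have := congrArg List.length h
        rw [List.length_take, List.length_nil] at this; omega
      have hdne : l.drop (l.length / 2) ≠ [] := by
        intro h; have := congrArg List.length h
        rw [List.length_drop, List.length_nil] at this; omega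
      have hlne : l ≠ [] := by intro h; subst h; simp at hn
      unfold pvTriple
      simp only [if_neg htne, if_neg hdne, if_neg hlne]
      refine Prod.ext ?_ (Prod.ext ?_ ?_)
      · show PySem.Int.mod ((l.take (l.length / 2)).prod % 65536 *
            ((l.drop (l.length / 2)).prod % 65536)) 65536 = l.prod % 65536
        conv_rhs => rw [hsplit]
        rw [List.prod_append, pv_mod_emod, ← Int.mul_emod]
      · show (l.take (l.length / 2)).sum + (l.drop (l.length / 2)).sum = l.sum
        conv_rhs => rw [hsplit]
        rw [List.sum_append]
      · show PySem.Int.bxor ((l.take (l.length / 2)).foldl PySem.Int.bxor 0)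
            ((l.drop (l.length / 2)).foldl PySem.Int.bxor 0) = l.foldl PySem.Int.bxor 0
        conv_rhs => rw [hsplit]
        rw [pv_xor_fold_append]

theorem pv_agg_eq (l : List Int) : pvAgg l = pvTriple l := pv_agg_aux l.length l le_rfl

-- A's fused fold also computes the canonical triple.
theorem pv_fused_eq (l : List Int) :
    l.foldl (fun (st : Int × Int × Int) b =>
        (PySem.Int.band (st.1 * b) 65535, st.2.1 + b, PySem.Int.bxor st.2.2 b)) (1, 0, 0)
    = pvTriple l := by
  rw [pv_fused_split]
  unfold pvTriple
  refine Prod.ext ?_ (Prod.ext ?_ rfl)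
  · show l.foldl (fun q b => PySem.Int.band (q * b) 65535) 1 = _
    have hmask : l.foldl (fun q b => PySem.Int.band (q * b) 65535) 1
        = l.foldl (fun q b => PySem.Int.mod (q * b) 65536) 1 := by
      induction l with
      | nil => rfl
      | cons b tl ih => simp only [List.foldl, pv_band_mask]
    rw [hmask]
    rcases eq_or_ne l [] with rfl | hne
    · rfl
    · rw [pv_prod_fold l 1 hne, one_mul, if_neg hne]
  · show l.foldl (· + ·) 0 = l.sum
    exact List.sum_eq_foldl.symm

-- ===== VERDICT (by name: the statement is the Claim_ definition above) =====
theorem arithmetic_check_spec : Claim_equal_arithmetic_check := by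
  intro data _
  unfold Spec_arithmetic_check arithmetic_check arithmetic_check_alt
  rw [pv_fused_eq, pv_agg_eq]
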